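-- pv_equiv track=rewrite | github.com/InaKarapetyan/IponWeb | src/Homeworks/homework_4.py | deleteDigit
-- ===== SOURCE A (Python) =====
-- def deleteDigit(n):
--         result = 0 # to compare then
--         i = 1
--
--         while n // i > 0:
--             temp = (n//(i * 10))*i + (n % i)#deletes the smallest digit
--             i *= 10
--             if temp > result:
--                 result = temp
--         return result
-- ===== SOURCE B (Python) =====
-- def deleteDigit(n):
--     # Greedy single pass: delete the first digit (from the left) that is
--     # smaller than its right neighbour; if digits never increase, delete the
--     # last digit. Degenerate inputs (n < 10, incl. negatives) give 0 like A.
--     if n < 10: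
--         return 0
--     p = 1
--     while n // (p * 100) > 0:
--         p *= 10
--     # p = 10^(m-2) where m is the digit count of n
--     while p >= 1:
--         if (n // (p * 10)) % 10 < (n // p) % 10:
--             return (n // (p * 100)) * (p * 10) + n % (p * 10)
--         p //= 10
--     return n // 10
-- ===== Notes on version B (the rewrite author's own statement) =====
-- stated objective: alternative
-- what changed: A generates every one-digit deletion (one per digit) and takes the maximum; B does a greedy scan from the most significant digit pair, returning the single deletion at the first descent (or dropping the last digit if digits never increase), so it computes at most one candidate.
import Mathlib
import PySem

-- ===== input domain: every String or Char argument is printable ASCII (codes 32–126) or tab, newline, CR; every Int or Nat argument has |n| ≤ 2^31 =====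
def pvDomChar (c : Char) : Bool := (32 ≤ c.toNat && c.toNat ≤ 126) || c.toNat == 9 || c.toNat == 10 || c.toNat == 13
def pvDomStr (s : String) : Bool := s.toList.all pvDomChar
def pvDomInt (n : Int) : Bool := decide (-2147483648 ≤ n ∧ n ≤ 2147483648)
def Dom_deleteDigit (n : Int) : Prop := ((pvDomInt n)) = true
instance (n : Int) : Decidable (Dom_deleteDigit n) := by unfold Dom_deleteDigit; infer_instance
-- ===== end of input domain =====

-- B replaces A's try-every-deletion-and-take-the-max loop by a greedy scan that
-- deletes the first digit (from the left) smaller than its right neighbour.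

-- ===== PORT A =====
-- the '1 ≤ i' conjunct only makes the recursion total; the loop always has i ≥ 1
def deleteDigitLoopA (n i result : Int) : Int :=
  if h : 1 ≤ i ∧ 0 < PySem.Int.floordiv n i then
    let temp := PySem.Int.floordiv n (i * 10) * i + PySem.Int.mod n i
    deleteDigitLoopA n (i * 10) (if temp > result then temp else result)
  else result
termination_by (PySem.Int.floordiv n i).toNat
decreasing_by
  have hi : (0:Int) < i := by omega
  have h10 : (0:Int) < i * 10 := by omega
  rw [PySem.Int.floordiv_eq_ediv_of_pos hi] at h
  rw [PySem.Int.floordiv_eq_ediv_of_pos hi, PySem.Int.floordiv_eq_ediv_of_pos h10]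
  have hdd : n / (i * 10) = n / i / 10 := by
    rw [Int.ediv_ediv_of_nonneg (by omega)]
  have : n / (i * 10) < n / i := by rw [hdd]; omega
  omega

def deleteDigit (n : Int) : Int := deleteDigitLoopA n 1 0

-- ===== PORT B =====
def findPB (n p : Int) : Int :=
  if h : 1 ≤ p ∧ 0 < PySem.Int.floordiv n (p * 100) then findPB n (p * 10) else p
termination_by (PySem.Int.floordiv n (p * 100)).toNat
decreasing_by
  have hp : (0:Int) < p * 100 := by omega
  have hp' : (0:Int) < p * 10 * 100 := by omega
  rw [PySem.Int.floordiv_eq_ediv_of_pos hp] at h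
  rw [PySem.Int.floordiv_eq_ediv_of_pos hp, PySem.Int.floordiv_eq_ediv_of_pos hp']
  have hdd : n / (p * 10 * 100) = n / (p * 100) / 10 := by
    rw [Int.ediv_ediv_of_nonneg (by omega)]; ring_nf
  have : n / (p * 10 * 100) < n / (p * 100) := by rw [hdd]; omega
  omega

def scanB (n p : Int) : Int :=
  if h : 1 ≤ p then
    if PySem.Int.mod (PySem.Int.floordiv n (p * 10)) 10 <
        PySem.Int.mod (PySem.Int.floordiv n p) 10 then
      PySem.Int.floordiv n (p * 100) * (p * 10) + PySem.Int.mod n (p * 10)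
    else scanB n (PySem.Int.floordiv p 10)
  else PySem.Int.floordiv n 10
termination_by p.toNat
decreasing_by
  rw [PySem.Int.floordiv_eq_ediv_of_pos (by norm_num : (0:Int) < 10)]
  omega

def deleteDigit_alt (n : Int) : Int :=
  if n < 10 then 0 else scanB n (findPB n 1)

-- ===== PRECONDITION & SPEC =====
def Spec_deleteDigit (n : Int) (out : Int) : Prop := out = deleteDigit_alt n
instance (n : Int) (out : Int) : Decidable (Spec_deleteDigit n out) := by unfold Spec_deleteDigit; infer_instance

-- ===== CLAIM (what is proved, stated in full; the proofs are below) =====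
def Claim_equal_deleteDigit : Prop := ∀ (n : Int), Dom_deleteDigit n → Spec_deleteDigit n (deleteDigit n)

-- ===== LEMMAS AND PROOFS =====

-- digit k of n (k-th from the right), and the value of n with digit k deleted
def dg (n : Int) (k : Nat) : Int := n / 10 ^ k % 10
def tmp (n : Int) (k : Nat) : Int := n / 10 ^ (k + 1) * 10 ^ k + n % 10 ^ k

-- spec-level fold of A's loop, from position k for c steps
def tmax (n : Int) (k c : Nat) (r : Int) : Int :=
  match c with
  | 0 => r
  | c + 1 => tmax n (k + 1) c (max r (tmp n k))

theorem pow10_pos (k : Nat) : (0:Int) < 10 ^ k := by positivity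

theorem fd_eq (n d : Int) (hd : 0 < d) : PySem.Int.floordiv n d = n / d :=
  PySem.Int.floordiv_eq_ediv_of_pos hd

theorem md_eq (n d : Int) (hd : 0 < d) : PySem.Int.mod n d = n % d :=
  PySem.Int.mod_eq_emod_of_pos hd

theorem ediv_pow_succ (n : Int) (k : Nat) : n / 10 ^ (k + 1) = n / 10 ^ k / 10 := by
  rw [Int.ediv_ediv_of_nonneg (by positivity : (0:Int) ≤ 10 ^ k), ← pow_succ]

theorem emod_pow_split (n : Int) (k : Nat) :
    n % 10 ^ (k + 1) = dg n k * 10 ^ k + n % 10 ^ k := by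
  have h1 := Int.mul_ediv_add_emod n (10 ^ (k + 1))
  have h2 := Int.mul_ediv_add_emod n (10 ^ k)
  have h3 := Int.mul_ediv_add_emod (n / 10 ^ k) 10
  rw [← ediv_pow_succ n k] at h3
  unfold dg
  rw [pow_succ] at h1 h3 ⊢
  linear_combination h1 - h2 - (10:Int) ^ k * h3

theorem tmp_sub_adj (n : Int) (k : Nat) :
    tmp n k - tmp n (k + 1) = (dg n (k + 1) - dg n k) * 10 ^ k := by
  unfold tmp dg
  have h3 := Int.mul_ediv_add_emod (n / 10 ^ (k + 1)) 10
  rw [← ediv_pow_succ n (k + 1)] at h3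
  have hs := emod_pow_split n k
  unfold dg at hs
  rw [pow_succ 10 (k + 1)] at h3 ⊢
  rw [pow_succ 10 k] at h3 hs ⊢
  linear_combination (-(10:Int) ^ k) * h3 - hs

theorem tmp_nonneg (n : Int) (k : Nat) (hn : 0 ≤ n) : 0 ≤ tmp n k := by
  unfold tmp
  have h1 : 0 ≤ n / 10 ^ (k + 1) := Int.ediv_nonneg hn (by positivity)
  have h2 : 0 ≤ n % 10 ^ k := Int.emod_nonneg n (by positivity)
  have := pow10_pos k
  nlinarith

theorem tmp_ediv_self (n : Int) (k : Nat) (hn : 0 ≤ n) :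
    tmp n k / 10 ^ k = n / 10 ^ (k + 1) := by
  unfold tmp
  rw [add_comm, Int.add_mul_ediv_right _ _ (by positivity : (10:Int) ^ k ≠ 0),
      Int.ediv_eq_zero_of_lt (Int.emod_nonneg n (by positivity))
        (Int.emod_lt_of_pos n (pow10_pos k))]
  omega

theorem tmp_ediv_low (n : Int) (k j : Nat) (hn : 0 ≤ n) (hkj : k ≤ j) :
    tmp n k / 10 ^ j = n / 10 ^ (j + 1) := by
  have h : (10:Int) ^ j = 10 ^ k * 10 ^ (j - k) := by
    rw [← pow_add]; congr 1; omega
  rw [h, ← Int.ediv_ediv_of_nonneg (by positivity : (0:Int) ≤ 10 ^ k),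
      tmp_ediv_self n k hn,
      Int.ediv_ediv_of_nonneg (by positivity : (0:Int) ≤ 10 ^ (k + 1)), ← pow_add]
  congr 2
  omega

theorem tmp_ediv_high (n : Int) (j : Nat) (hn : 0 ≤ n) :
    tmp n (j + 1) / 10 ^ j = n / 10 ^ (j + 2) * 10 + dg n j := by
  unfold tmp
  rw [emod_pow_split n j]
  have e2 : (10:Int) ^ (j + 1 + 1) = 10 ^ (j + 2) := by ring
  rw [e2]
  have hq : n / 10 ^ (j + 2) * 10 ^ (j + 1) + (dg n j * 10 ^ j + n % 10 ^ j)
      = n % 10 ^ j + (n / 10 ^ (j + 2) * 10 + dg n j) * 10 ^ j := by ring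
  rw [hq, Int.add_mul_ediv_right _ _ (by positivity : (10:Int) ^ j ≠ 0),
      Int.ediv_eq_zero_of_lt (Int.emod_nonneg n (by positivity))
        (Int.emod_lt_of_pos n (pow10_pos j))]
  omega

-- descent at j: digit j+1 (one place more significant) is smaller than digit j
def Descent (n : Int) (j : Nat) : Prop := dg n (j + 1) < dg n j

theorem tmp_ge_of_no_descent (n : Int) (j : Nat) (hd : ¬ Descent n j) :
    tmp n (j + 1) ≤ tmp n j := by
  have h := tmp_sub_adj n j
  unfold Descent at hd
  have h2 : 0 ≤ (dg n (j + 1) - dg n j) * 10 ^ j :=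
    mul_nonneg (by omega) (le_of_lt (pow10_pos j))
  linarith

-- everything strictly below the greedy deletion position is strictly smaller
theorem tmp_low_lt (n : Int) (j k : Nat) (hn : 0 ≤ n) (hk : k ≤ j) (hd : Descent n j) :
    tmp n k < tmp n (j + 1) := by
  by_contra hle
  push_neg at hle
  have hmono := Int.ediv_le_ediv (pow10_pos j) hle
  rw [tmp_ediv_low n k j hn hk, tmp_ediv_high n j hn] at hmono
  have h5 := Int.mul_ediv_add_emod (n / 10 ^ (j + 1)) 10
  rw [← ediv_pow_succ n (j + 1)] at h5
  have e2 : (10:Int) ^ (j + 1 + 1) = 10 ^ (j + 2) := by ring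
  rw [e2] at h5
  unfold Descent at hd
  have h6 : dg n (j + 1) = n / 10 ^ (j + 1) % 10 := rfl
  omega

-- chain: climbing through descent-free positions only shrinks the value
theorem tmp_chain_le (n : Int) (b : Nat) :
    ∀ c, (∀ j, b ≤ j → j < b + c → ¬ Descent n j) → tmp n (b + c) ≤ tmp n b := by
  intro c
  induction c with
  | zero => intro _; exact le_refl _
  | succ c ih =>
      intro hnd
      have h := tmp_ge_of_no_descent n (b + c) (hnd (b + c) (by omega) (by omega))
      have he : b + (c + 1) = (b + c) + 1 := by omega
      rw [he]
      exact le_trans h (ih (fun j h1 h2 => hnd j h1 (by omega)))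

-- ===== characterisation of A's loop =====

theorem loopA_step (n : Int) (k : Nat) (r : Int) (hn : 0 ≤ n) (h : 10 ^ k ≤ n) :
    deleteDigitLoopA n (10 ^ k) r = deleteDigitLoopA n (10 ^ (k + 1)) (max r (tmp n k)) := by
  have hp := pow10_pos k
  have h1 : (1:Int) ≤ n / 10 ^ k := by
    rw [Int.le_ediv_iff_mul_le hp]; omega
  have hcond : (1:Int) ≤ 10 ^ k ∧ 0 < PySem.Int.floordiv n (10 ^ k) := by
    refine ⟨by omega, ?_⟩
    rw [fd_eq _ _ hp]; omega
  rw [deleteDigitLoopA, dif_pos hcond]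
  have e1 : (10:Int) ^ k * 10 = 10 ^ (k + 1) := (pow_succ 10 k).symm
  rw [e1]
  show deleteDigitLoopA n (10 ^ (k + 1))
      (if PySem.Int.floordiv n (10 ^ (k + 1)) * 10 ^ k + PySem.Int.mod n (10 ^ k) > r then
        PySem.Int.floordiv n (10 ^ (k + 1)) * 10 ^ k + PySem.Int.mod n (10 ^ k) else r)
      = deleteDigitLoopA n (10 ^ (k + 1)) (max r (tmp n k))
  congr 1
  rw [fd_eq _ _ (pow10_pos (k + 1)), md_eq _ _ hp]
  unfold tmp
  rw [max_def]
  split_ifs <;> omega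

theorem loopA_eq_tmax (n : Int) (m : Nat) (hn : 0 ≤ n)
    (hmlow : ∀ k, k < m → (10:Int) ^ k ≤ n) (hm2 : n < 10 ^ m) :
    ∀ c k r, k + c = m → deleteDigitLoopA n (10 ^ k) r = tmax n k c r := by
  intro c
  induction c with
  | zero =>
      intro k r hk
      have hk' : k = m := by omega
      rw [deleteDigitLoopA]
      have hz : PySem.Int.floordiv n (10 ^ k) = 0 := by
        rw [fd_eq _ _ (pow10_pos k), hk']
        exact Int.ediv_eq_zero_of_lt hn hm2
      rw [dif_neg (by rw [hz]; omega)]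
      rfl
  | succ c ih =>
      intro k r hk
      rw [loopA_step n k r hn (hmlow k (by omega))]
      rw [ih (k + 1) (max r (tmp n k)) (by omega)]
      rfl

-- ===== max facts about tmax =====

theorem tmax_ge_r (n : Int) (k c : Nat) (r : Int) : r ≤ tmax n k c r := by
  induction c generalizing k r with
  | zero => exact le_refl _
  | succ c ih => exact le_trans (le_max_left _ _) (ih (k + 1) _)

theorem tmax_ge_mem (n : Int) (k c : Nat) (r : Int) :
    ∀ j, k ≤ j → j < k + c → tmp n j ≤ tmax n k c r := by
  induction c generalizing k r with
  | zero => intro j h1 h2; omega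
  | succ c ih =>
      intro j h1 h2
      by_cases hj : j = k
      · rw [hj]
        exact le_trans (le_max_right _ _) (tmax_ge_r n (k + 1) c _)
      · exact ih (k + 1) _ j (by omega) (by omega)

theorem tmax_le (n : Int) (k c : Nat) (r v : Int)
    (hr : r ≤ v) (hall : ∀ j, k ≤ j → j < k + c → tmp n j ≤ v) :
    tmax n k c r ≤ v := by
  induction c generalizing k r with
  | zero => exact hr
  | succ c ih =>
      apply ih (k + 1)
      · exact max_le hr (hall k (le_refl _) (by omega))
      · intro j h1 h2; exact hall j (by omega) (by omega)

-- ===== characterisation of B's helper loops =====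

theorem findPB_eq (n : Int) (m : Nat) (hn : 0 ≤ n) (hm : 2 ≤ m)
    (hm1 : 10 ^ (m - 1) ≤ n) (hm2 : n < 10 ^ m) :
    ∀ c k, k + c = m - 2 → findPB n (10 ^ k) = 10 ^ (m - 2) := by
  intro c
  induction c with
  | zero =>
      intro k hk
      have hk' : k = m - 2 := by omega
      subst hk'
      rw [findPB]
      have e1 : (10:Int) ^ (m - 2) * 100 = 10 ^ m := by
        rw [show (100:Int) = 10 ^ 2 by norm_num, ← pow_add]
        congr 1; omega
      have hz : PySem.Int.floordiv n (10 ^ (m - 2) * 100) = 0 := by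
        rw [e1, fd_eq _ _ (pow10_pos m)]
        exact Int.ediv_eq_zero_of_lt hn hm2
      rw [dif_neg (by rw [hz]; omega)]
  | succ c ih =>
      intro k hk
      rw [findPB]
      have e1 : (10:Int) ^ k * 100 = 10 ^ (k + 2) := by
        rw [show (100:Int) = 10 ^ 2 by norm_num, ← pow_add]
      have hle : (10:Int) ^ (k + 2) ≤ n := by
        refine le_trans ?_ hm1
        apply pow_le_pow_right₀ (by norm_num)
        omega
      have hpos : (0:Int) < PySem.Int.floordiv n (10 ^ k * 100) := by
        rw [e1, fd_eq _ _ (pow10_pos (k + 2))]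
        rw [show (0:Int) = 1 - 1 by ring]
        have : (1:Int) ≤ n / 10 ^ (k + 2) := by
          rw [Int.le_ediv_iff_mul_le (pow10_pos (k + 2))]; omega
        omega
      rw [dif_pos ⟨by have := pow10_pos k; omega, hpos⟩]
      have e2 : (10:Int) ^ k * 10 = 10 ^ (k + 1) := (pow_succ 10 k).symm
      rw [e2]
      exact ih (k + 1) (by omega)

theorem tmp_zero (n : Int) : tmp n 0 = n / 10 := by
  unfold tmp
  simp [Int.emod_one]

theorem scanB_zero (n : Int) (hn : 0 ≤ n) :
    scanB n 1 = if dg n 1 < dg n 0 then tmp n 1 else tmp n 0 := by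
  rw [scanB, dif_pos (by norm_num : (1:Int) ≤ 1)]
  have d1 : PySem.Int.mod (PySem.Int.floordiv n (1 * 10)) 10 = dg n 1 := by
    rw [fd_eq _ _ (by norm_num), md_eq _ _ (by norm_num)]
    unfold dg; norm_num
  have d0 : PySem.Int.mod (PySem.Int.floordiv n 1) 10 = dg n 0 := by
    rw [fd_eq _ _ (by norm_num), md_eq _ _ (by norm_num)]
    unfold dg; norm_num
  rw [d1, d0]
  have hb1 : PySem.Int.floordiv n (1 * 100) * (1 * 10) + PySem.Int.mod n (1 * 10) = tmp n 1 := by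
    rw [fd_eq _ _ (by norm_num), md_eq _ _ (by norm_num)]
    unfold tmp; norm_num
  have hb0 : scanB n (PySem.Int.floordiv 1 10) = tmp n 0 := by
    rw [show PySem.Int.floordiv 1 10 = 0 by rw [fd_eq _ _ (by norm_num)]; norm_num]
    rw [scanB, dif_neg (by norm_num), fd_eq _ _ (by norm_num), tmp_zero]
  rw [hb1, hb0]

theorem scanB_step (n : Int) (k : Nat) (hn : 0 ≤ n) :
    scanB n (10 ^ (k + 1)) =
      if dg n (k + 2) < dg n (k + 1) then tmp n (k + 2) else scanB n (10 ^ k) := by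
  have hp1 := pow10_pos (k + 1)
  rw [scanB, dif_pos (by omega : (1:Int) ≤ 10 ^ (k + 1))]
  have e1 : (10:Int) ^ (k + 1) * 10 = 10 ^ (k + 2) := by
    rw [pow_succ]; ring_nf
  have e2 : (10:Int) ^ (k + 1) * 100 = 10 ^ (k + 3) := by
    rw [show (100:Int) = 10 ^ 2 by norm_num, ← pow_add]
  have d2 : PySem.Int.mod (PySem.Int.floordiv n (10 ^ (k + 1) * 10)) 10 = dg n (k + 2) := by
    rw [e1, fd_eq _ _ (pow10_pos (k + 2)), md_eq _ _ (by norm_num)]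
    rfl
  have d1 : PySem.Int.mod (PySem.Int.floordiv n (10 ^ (k + 1))) 10 = dg n (k + 1) := by
    rw [fd_eq _ _ hp1, md_eq _ _ (by norm_num)]
    rfl
  have hb : PySem.Int.floordiv n (10 ^ (k + 1) * 100) * (10 ^ (k + 1) * 10) +
      PySem.Int.mod n (10 ^ (k + 1) * 10) = tmp n (k + 2) := by
    rw [e1, e2, fd_eq _ _ (pow10_pos (k + 3)), md_eq _ _ (pow10_pos (k + 2))]
    unfold tmp
    norm_num
  have hr : PySem.Int.floordiv (10 ^ (k + 1)) 10 = 10 ^ k := by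
    rw [fd_eq _ _ (by norm_num), pow_succ]
    exact Int.mul_ediv_cancel _ (by norm_num)
  rw [d2, d1, hb, hr]

theorem scanB_no_descent (n : Int) (hn : 0 ≤ n) :
    ∀ k, (∀ j, j ≤ k → ¬ Descent n j) → scanB n (10 ^ k) = tmp n 0 := by
  intro k
  induction k with
  | zero =>
      intro h
      have hd := h 0 (le_refl _)
      unfold Descent at hd
      rw [pow_zero, scanB_zero n hn, if_neg hd]
  | succ k ih =>
      intro h
      have hd := h (k + 1) (le_refl _)
      unfold Descent at hd
      rw [scanB_step n k hn, if_neg hd]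
      exact ih (fun j hj => h j (by omega))

theorem scanB_descent (n : Int) (j : Nat) (hn : 0 ≤ n) (hd : Descent n j) :
    ∀ k, j ≤ k → (∀ i, j < i → i ≤ k → ¬ Descent n i) → scanB n (10 ^ k) = tmp n (j + 1) := by
  intro k
  induction k with
  | zero =>
      intro hk _
      have hj0 : j = 0 := by omega
      subst hj0
      unfold Descent at hd
      rw [pow_zero, scanB_zero n hn, if_pos hd]
  | succ k ih =>
      intro hk hmax
      by_cases hj : j = k + 1
      · subst hj
        unfold Descent at hd
        rw [scanB_step n k hn, if_pos hd]
      · have hnd := hmax (k + 1) (by omega) (le_refl _)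
        unfold Descent at hnd
        rw [scanB_step n k hn, if_neg hnd]
        exact ih (by omega) (fun i h1 h2 => hmax i h1 (by omega))

-- ===== main equality =====

theorem main_ge_ten (n : Int) (hn : 10 ≤ n) : deleteDigit n = deleteDigit_alt n := by
  -- digit count m
  set m : Nat := Nat.log 10 n.toNat + 1 with hm_def
  have hn0 : 0 ≤ n := by omega
  have hnn : n.toNat = n := Int.toNat_of_nonneg hn0
  have hm2 : n < 10 ^ m := by
    have := Nat.lt_pow_succ_log_self (by norm_num : 1 < 10) n.toNat
    have h' : (n.toNat : Int) < ((10 ^ (Nat.log 10 n.toNat + 1) : Nat) : Int) := by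
      exact_mod_cast this
    rw [hnn] at h'
    push_cast at h'
    exact h'
  have hm1 : (10:Int) ^ (m - 1) ≤ n := by
    have hten : 10 ≤ n.toNat := by omega
    have := Nat.pow_log_le_self 10 (by omega : n.toNat ≠ 0)
    have h' : ((10 ^ Nat.log 10 n.toNat : Nat) : Int) ≤ (n.toNat : Int) := by
      exact_mod_cast this
    rw [hnn] at h'
    push_cast at h'
    have he : m - 1 = Nat.log 10 n.toNat := by omega
    rw [he]
    exact h'
  have hmge : 2 ≤ m := by
    have : 1 ≤ Nat.log 10 n.toNat := Nat.log_pos (by norm_num) (by omega)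
    omega
  have hmlow : ∀ k, k < m → (10:Int) ^ k ≤ n := by
    intro k hk
    refine le_trans ?_ hm1
    exact pow_le_pow_right₀ (by norm_num) (by omega)
  -- A's side
  have hA : deleteDigit n = tmax n 0 m 0 := by
    have := loopA_eq_tmax n m hn0 hmlow hm2 m 0 0 (by omega)
    rw [pow_zero] at this
    exact this
  -- B's side
  have hB : deleteDigit_alt n = scanB n (10 ^ (m - 2)) := by
    rw [deleteDigit_alt, if_neg (by omega)]
    have := findPB_eq n m hn0 hmge hm1 hm2 (m - 2) 0 (by omega)
    rw [pow_zero] at this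
    rw [this]
  rw [hA, hB]
  by_cases hex : ∃ j, j ≤ m - 2 ∧ Descent n j
  · -- there is a descent: greedy deletes at the largest one
    obtain ⟨j0, hj0le, hj0d⟩ := hex
    have hdec : DecidablePred (fun j => Descent n j) := by
      intro j; unfold Descent; infer_instance
    set J := Nat.findGreatest (fun j => Descent n j) (m - 2) with hJdef
    have hJd : Descent n J := Nat.findGreatest_spec hj0le hj0d
    have hJle : J ≤ m - 2 := Nat.findGreatest_le _
    have hJmax : ∀ i, J < i → i ≤ m - 2 → ¬ Descent n i := by
      intro i h1 h2
      exact Nat.findGreatest_is_greatest h1 h2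
    rw [scanB_descent n J hn0 hJd (m - 2) hJle hJmax]
    -- tmax = tmp n (J+1)
    apply le_antisymm
    · apply tmax_le
      · exact tmp_nonneg n (J + 1) hn0
      · intro j _ hj
        rcases lt_trichotomy j (J + 1) with h | h | h
        · exact le_of_lt (tmp_low_lt n J j hn0 (by omega) hJd)
        · rw [h]
        · have hc := tmp_chain_le n (J + 1) (j - (J + 1)) ?_
          · have he : J + 1 + (j - (J + 1)) = j := by omega
            rw [he] at hc
            exact hc
          · intro i h1 h2
            exact hJmax i (by omega) (by omega)
    · exact tmax_ge_mem n 0 m 0 (J + 1) (by omega) (by omega)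
  · -- no descent: greedy deletes the last digit
    push_neg at hex
    rw [scanB_no_descent n hn0 (m - 2) hex]
    apply le_antisymm
    · apply tmax_le
      · exact tmp_nonneg n 0 hn0
      · intro j _ hj
        have hc := tmp_chain_le n 0 j ?_
        · simpa using hc
        · intro i h1 h2
          exact hex i (by omega)
    · exact tmax_ge_mem n 0 m 0 0 (by omega) (by omega)

theorem main_small (n : Int) (hn : n < 10) : deleteDigit n = deleteDigit_alt n := by
  rw [deleteDigit_alt, if_pos hn, deleteDigit]
  by_cases h0 : n ≤ 0
  · rw [deleteDigitLoopA]
    rw [dif_neg ?_]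
    rw [fd_eq _ _ (by norm_num), Int.ediv_one]
    omega
  · have hn0 : 0 ≤ n := by omega
    have := loopA_eq_tmax n 1 hn0 (by intro k hk; interval_cases k; simpa using h0)
      (by simpa using hn) 1 0 0 (by omega)
    rw [pow_zero] at this
    rw [this]
    show max 0 (tmp n 0) = 0
    rw [tmp_zero, Int.ediv_eq_zero_of_lt hn0 hn]
    simp

-- ===== VERDICT (by name: the statement is the Claim_ definition above) =====
theorem deleteDigit_spec : Claim_equal_deleteDigit := by
  intro n _
  unfold Spec_deleteDigit
  by_cases h : n < 10
  · exact main_small n h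
  · exact main_ge_ten n (by omega)
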